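-- pv_equiv track=rewrite | github.com/AlexanderKud/secp256k1_bitcoin_tools | secp256k1/get_private_key_close_simulation.py | generate_parity_list
-- ===== SOURCE A (Python) =====
-- def generate_parity_list(scalar):
--     parity_list = list()
--     while scalar > 1:
--         if scalar % 2 == 0:
--             scalar //= 2
--             parity_list.append("even")
--         else:
--             scalar -= 1
--             scalar //= 2
--             parity_list.append("odd")
--     return parity_list
-- ===== SOURCE B (Python) =====
-- def generate_parity_list(scalar):
--     if scalar <= 1:
--         return []
--     b = bin(scalar)[3:]  # binary digits without '0b' and without the leading 1
--     return ["even" if c == '0' else "odd" for c in reversed(b)]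
-- ===== Notes on version B (the rewrite author's own statement) =====
-- stated objective: simpler
-- what changed: Replaces the mutate-and-halve while loop by a single binary-string extraction bin(scalar)[3:] mapped LSB-first via a list comprehension.
import Mathlib
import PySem

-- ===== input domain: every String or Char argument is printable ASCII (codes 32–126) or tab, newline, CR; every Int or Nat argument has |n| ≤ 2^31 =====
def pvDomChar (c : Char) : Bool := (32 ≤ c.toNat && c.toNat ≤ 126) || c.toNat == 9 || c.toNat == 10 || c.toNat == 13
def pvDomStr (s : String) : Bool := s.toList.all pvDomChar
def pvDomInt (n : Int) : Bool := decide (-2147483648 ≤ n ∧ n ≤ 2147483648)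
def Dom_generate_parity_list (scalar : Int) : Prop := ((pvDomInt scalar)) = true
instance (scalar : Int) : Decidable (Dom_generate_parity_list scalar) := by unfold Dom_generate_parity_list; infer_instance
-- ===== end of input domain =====

-- B replaces A's mutate-and-halve while loop with one binary-digit extraction (bin(scalar)[3:]) mapped LSB-first; same cost, simpler.


-- ===== PORT A =====
def generate_parity_list (scalar : Int) : List String :=
  if h : scalar > 1 then
    if PySem.Int.mod scalar 2 == 0 then
      "even" :: generate_parity_list (PySem.Int.floordiv scalar 2)
    else
      "odd" :: generate_parity_list (PySem.Int.floordiv (scalar - 1) 2)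
  else []
termination_by scalar.toNat
decreasing_by
  · have := PySem.Int.floordiv_eq_ediv_of_pos (a := scalar) (b := 2) (by omega)
    rw [this]; omega
  · have := PySem.Int.floordiv_eq_ediv_of_pos (a := scalar - 1) (b := 2) (by omega)
    rw [this]; omega

-- ===== PORT B =====
-- bin(n) digits for a positive n, MSB first (hand port of Python's bin, exact for n > 0)
def pvBinDigits : Nat → List Char
  | 0 => []
  | (n+1) => pvBinDigits ((n+1) / 2) ++ [if (n+1) % 2 == 0 then '0' else '1']

def generate_parity_list_alt (scalar : Int) : List String :=
  if scalar ≤ 1 then []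
  else ((pvBinDigits scalar.toNat).drop 1).reverse.map
        (fun c => if c == '0' then "even" else "odd")

-- ===== PRECONDITION & SPEC =====
def Spec_generate_parity_list (scalar : Int) (out : List String) : Prop := out = generate_parity_list_alt scalar
instance (scalar : Int) (out : List String) : Decidable (Spec_generate_parity_list scalar out) := by unfold Spec_generate_parity_list; infer_instance

-- ===== CLAIM (what is proved, stated in full; the proofs are below) =====
def Claim_equal_generate_parity_list : Prop := ∀ (scalar : Int), Dom_generate_parity_list scalar → Spec_generate_parity_list scalar (generate_parity_list scalar)

-- ===== LEMMAS AND PROOFS =====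


-- pvBinDigits is nonempty on positive input
theorem pvBinDigits_ne_nil (n : Nat) (h : 1 ≤ n) : pvBinDigits n ≠ [] := by
  match n, h with
  | (m+1), _ => simp [pvBinDigits]

-- one unfolding step of B's bit string for n ≥ 2, seen LSB-first
theorem alt_step (n : Nat) (h : 2 ≤ n) :
    ((pvBinDigits n).drop 1).reverse
      = (if n % 2 == 0 then '0' else '1') :: ((pvBinDigits (n / 2)).drop 1).reverse := by
  match n, h with
  | (m+1), _ =>
    have hne : pvBinDigits ((m+1) / 2) ≠ [] := pvBinDigits_ne_nil _ (by omega)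
    have hlen : 1 ≤ (pvBinDigits ((m+1) / 2)).length := by
      cases hl : pvBinDigits ((m+1) / 2) with
      | nil => exact absurd hl hne
      | cons a l => simp
    rw [pvBinDigits, List.drop_append_of_le_length hlen, List.reverse_append]
    simp

-- the two ports agree on every natural number
theorem ports_agree_nat (n : Nat) :
    generate_parity_list (n : Int) = generate_parity_list_alt (n : Int) := by
  induction n using Nat.strong_induction_on with
  | _ n ih =>
    by_cases h2 : n ≤ 1
    · rw [generate_parity_list, generate_parity_list_alt,
        dif_neg (by omega : ¬ ((n : Int) > 1)), if_pos (by omega : (n : Int) ≤ 1)]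
    · have hn2 : 2 ≤ n := by omega
      have hmod : PySem.Int.mod (n : Int) 2 = ((n % 2 : Nat) : Int) := by
        exact_mod_cast PySem.Int.mod_natCast n 2
      have hdiv : PySem.Int.floordiv (n : Int) 2 = ((n / 2 : Nat) : Int) := by
        exact_mod_cast PySem.Int.floordiv_natCast n 2
      have hdiv' : PySem.Int.floordiv ((n : Int) - 1) 2 = (((n - 1) / 2 : Nat) : Int) := by
        have : (n : Int) - 1 = ((n - 1 : Nat) : Int) := by omega
        rw [this]; exact_mod_cast PySem.Int.floordiv_natCast (n - 1) 2
      have ihd := ih (n / 2) (by omega)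
      have halt : generate_parity_list_alt ((n : Int)) =
          (if n % 2 == 0 then "even" else "odd") :: generate_parity_list_alt ((n / 2 : Nat) : Int) := by
        rw [generate_parity_list_alt, generate_parity_list_alt]
        simp only [if_neg (by omega : ¬ ((n : Int) ≤ 1)), Int.toNat_natCast]
        rw [alt_step n hn2, List.map_cons]
        by_cases hp : n % 2 = 0
        · simp only [hp]
          by_cases h21 : n / 2 ≤ 1
          · have hd1 : n / 2 = 1 := by omega
            rw [hd1]; simp [pvBinDigits]
          · simp only [if_neg (by omega : ¬ (((n / 2 : Nat) : Int) ≤ 1))]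
            simp
        · have hp1 : n % 2 = 1 := by omega
          simp only [hp1]
          by_cases h21 : n / 2 ≤ 1
          · have hd1 : n / 2 = 1 := by omega
            rw [hd1]; simp [pvBinDigits]
          · simp only [if_neg (by omega : ¬ (((n / 2 : Nat) : Int) ≤ 1))]
            simp
      rw [generate_parity_list, dif_pos (by omega : (n : Int) > 1)]
      by_cases hp : n % 2 = 0
      · have hb : (PySem.Int.mod (n : Int) 2 == 0) = true := by
          rw [hmod, hp]; rfl
        have hceq : (if n % 2 == 0 then "even" else "odd") = "even" := by rw [hp]; decide
        rw [if_pos hb, hdiv, halt, hceq, ihd]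
      · have hp1 : n % 2 = 1 := by omega
        have hb : ¬ ((PySem.Int.mod (n : Int) 2 == 0) = true) := by
          rw [hmod, hp1]; simp
        have hceq : (if n % 2 == 0 then "even" else "odd") = "odd" := by rw [hp1]; decide
        have h12 : (n - 1) / 2 = n / 2 := by omega
        rw [if_neg hb, hdiv', h12, halt, hceq, ihd]

-- ===== VERDICT (by name: the statement is the Claim_ definition above) =====
theorem generate_parity_list_spec : Claim_equal_generate_parity_list := by
  intro scalar _
  unfold Spec_generate_parity_list
  by_cases h : scalar ≤ 1
  · rw [generate_parity_list, generate_parity_list_alt,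
      dif_neg (by omega : ¬ (scalar > 1)), if_pos h]
  · have hn : scalar = (scalar.toNat : Int) := by omega
    rw [hn]; exact ports_agree_nat scalar.toNat
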